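-- pv_equiv track=rewrite | github.com/VaideheeBarde/Data-Structures-and-Algorithms---Python | absentValueArray.py | find_missing_element
-- ===== SOURCE A (Python) =====
-- import itertools
--
-- def find_missing_element(stream):
--     num_bucket = 1 << 16
--     counter = [0] * num_bucket
--     stream, stream_copy = itertools.tee(stream)
--
--     for x in stream:
--         upper_part_x = x >> 16
--         counter[upper_part_x] += 1
--
--     #Look for a bucket that contains less than (1<<16) elements
--     bucket_capacity = 1 << 16
--     candidate_bucket = next(i for i, c in enumerate(counter) if c < bucket_capacity)
--
--     #Find all IP addresses in the stream whose first 16 bits are equal to candidate bucket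
--     candidates = [0] * bucket_capacity
--     stream = stream_copy
--     for x in stream_copy:
--         upper_part_x = x >> 16
--         if candidate_bucket == upper_part_x:
--             #Record the presence of 16 LSB of x
--             lower_part_x = ((1<<16) - 1) & x
--             candidates[lower_part_x] = 1
--
--     #At least one of the LSB combinations is absent, find it.
--     for i, v in enumerate(candidates):
--         if v == 0:
--             return (candidate_bucket << 16) | i
-- ===== SOURCE B (Python) =====
-- def find_missing_element(stream):
--     NUM = 1 << 16
--     # single pass: list counter (kept a list so negative upper parts wrap as in A)
--     # plus an index bucket -> set of low-16 values seen, replacing the second scan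
--     counter = [0] * NUM
--     lows = {}
--     for x in stream:
--         u = x >> 16
--         counter[u] += 1
--         lows.setdefault(u, set()).add(x & (NUM - 1))
--     candidate = next(i for i, c in enumerate(counter) if c < NUM)
--     present = lows.get(candidate, set())
--     return (candidate << 16) | next(i for i in range(NUM) if i not in present)
-- ===== Notes on version B (the rewrite author's own statement) =====
-- stated objective: alternative
-- what changed: Single pass over the stream that updates the bucket counter and simultaneously builds a dict mapping each upper-16 bucket to the set of low-16 values seen, replacing itertools.tee, the second full scan of the stream and the 65536-slot presence array with a set-membership scan.
import Mathlib
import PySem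

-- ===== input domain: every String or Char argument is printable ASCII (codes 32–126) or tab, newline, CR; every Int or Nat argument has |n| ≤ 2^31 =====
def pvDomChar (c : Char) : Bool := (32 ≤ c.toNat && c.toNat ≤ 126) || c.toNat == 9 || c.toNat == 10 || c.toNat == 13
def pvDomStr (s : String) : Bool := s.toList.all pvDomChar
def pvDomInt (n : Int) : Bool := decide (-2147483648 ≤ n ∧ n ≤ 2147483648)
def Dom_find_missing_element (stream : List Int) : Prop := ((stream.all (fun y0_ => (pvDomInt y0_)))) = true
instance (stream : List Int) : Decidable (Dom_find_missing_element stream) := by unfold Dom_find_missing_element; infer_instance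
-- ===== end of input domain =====

-- B makes ONE pass over the stream, updating the bucket counter and building a dict
-- bucket → set of seen low-16 values, replacing A's itertools.tee, second scan and
-- 65536-slot presence array (objective: alternative; same asymptotic cost).
-- A raises StopIteration only on streams of ≥ 2^32 elements (all bucket counts
-- saturated); the claim quantifies over Dom, and on it the ports agree everywhere.

-- ===== PORT A =====
-- `counter[upper] += 1` / `candidates[lower] = 1`: pyGetD/pySetD wrap a negative index like
-- Python (their IndexError default case is unreachable on Dom, |x| ≤ 2^31 keeps the wrapped
-- index in range). `next(i for i, c in enumerate(counter) if c < cap)` is the first index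
-- whose entry passes the test = List.findIdx (on exhaustion findIdx yields the length, where
-- next would raise StopIteration). `x >> 16` is Int's `>>> 16` (arithmetic shift, Python-exact);
-- `((1<<16)-1) & x` is PySem.Int.band 65535 x; `(c << 16) | i` is PySem.Int.bor (c <<< 16) i.
def find_missing_element (stream : List Int) : Int :=
  let numBucket : Nat := 1 <<< 16
  let counter : List Int := stream.foldl
    (fun (c : List Int) (x : Int) =>
      PySem.List.pySetD c (x >>> (16 : Nat)) (PySem.List.pyGetD c (x >>> (16 : Nat)) 0 + 1))
    (List.replicate numBucket 0)
  let candidate_bucket : Int := (counter.findIdx (fun c => decide (c < 65536)) : Int)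
  let candidates : List Int := stream.foldl
    (fun (c : List Int) (x : Int) =>
      if candidate_bucket == x >>> (16 : Nat) then
        PySem.List.pySetD c (PySem.Int.band 65535 x) 1
      else c)
    (List.replicate numBucket 0)
  let i : Int := (candidates.findIdx (fun v => v == 0) : Int)
  PySem.Int.bor (candidate_bucket <<< (16 : Nat)) i

-- ===== PORT B =====
-- next(i for i in range(n) if pred(i)) starting at `i`, scanning `n` steps; none = StopIteration
def pyFirstInRange (n : Nat) (i : Int) (pred : Int → Bool) : Option Int :=
  match n with
  | 0 => none
  | Nat.succ m => if pred i then some i else pyFirstInRange m (i + 1) pred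

-- one pass keeping the pair (counter list, dict bucket → set of low-16 values);
-- `lows.setdefault(u, set()).add(low)` = insert u (add (getD u ∅) low);
-- the `.getD 0` after pyFirstInRange is the StopIteration case, unreachable on Dom.
def find_missing_element_alt (stream : List Int) : Int :=
  let NUM : Nat := 1 <<< 16
  let acc : List Int × PySem.Dict Int (PySem.Set Int) := stream.foldl
    (fun acc (x : Int) =>
      (PySem.List.pySetD acc.1 (x >>> (16 : Nat)) (PySem.List.pyGetD acc.1 (x >>> (16 : Nat)) 0 + 1),
       acc.2.insert (x >>> (16 : Nat))
         (PySem.Set.add (acc.2.getD (x >>> (16 : Nat)) PySem.Set.empty) (PySem.Int.band x 65535))))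
    (List.replicate NUM 0, PySem.Dict.empty)
  let candidate : Int := (acc.1.findIdx (fun c => decide (c < 65536)) : Int)
  let present : PySem.Set Int := acc.2.getD candidate PySem.Set.empty
  PySem.Int.bor (candidate <<< (16 : Nat))
    ((pyFirstInRange NUM 0 (fun i => !(PySem.Set.contains present i))).getD 0)

-- ===== PRECONDITION & SPEC =====
def Spec_find_missing_element (stream : List Int) (out : Int) : Prop := out = find_missing_element_alt stream
instance (stream : List Int) (out : Int) : Decidable (Spec_find_missing_element stream out) := by unfold Spec_find_missing_element; infer_instance

-- ===== CLAIM (what is proved, stated in full; the proofs are below) =====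
def Claim_equal_find_missing_element : Prop := ∀ (stream : List Int), Dom_find_missing_element stream → Spec_find_missing_element stream (find_missing_element stream)

-- ===== LEMMAS AND PROOFS =====

theorem shift16_bound (x : Int) (h : pvDomInt x = true) :
    -32768 ≤ x >>> (16 : Nat) ∧ x >>> (16 : Nat) ≤ 32768 := by
  simp only [pvDomInt, decide_eq_true_eq] at h
  rw [Int.shiftRight_eq_div_pow]; norm_num; omega

-- Python's x & 65535 always lands in [0, 65536)
theorem band_mask_bounds (x : Int) :
    0 ≤ PySem.Int.band 65535 x ∧ PySem.Int.band 65535 x < 65536 := by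
  unfold PySem.Int.band
  rw [if_pos (by norm_num : (0:Int) ≤ 65535)]
  have htn : (65535 : Int).toNat = 65535 := rfl
  split_ifs with h2
  · have h := Nat.and_le_left (n := (65535 : Int).toNat) (m := x.toNat)
    rw [htn] at h
    constructor
    · exact Int.natCast_nonneg _
    · exact_mod_cast Nat.lt_succ_of_le h
  · have h : (65535 : Int).toNat - ((65535 : Int).toNat &&& (-x - 1).toNat) ≤ 65535 := by
      rw [htn]; omega
    constructor
    · exact Int.natCast_nonneg _
    · exact_mod_cast Nat.lt_succ_of_le h

theorem getD_set_eq (c : List Int) (k j : Nat) (v : Int) (hk : k < c.length) :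
    (c.set k v).getD j 0 = if j = k then v else c.getD j 0 := by
  simp only [List.getD, List.getElem?_set]
  by_cases h : k = j
  · subst h; simp [hk]
  · rw [if_neg h, if_neg (fun hh : j = k => h hh.symm)]

theorem getD_repl (j : Nat) : (List.replicate 65536 (0 : Int)).getD j 0 = 0 := by
  rw [List.getD, List.getElem?_replicate]
  split_ifs <;> rfl

-- A's counter bump: length preserved
theorem ctr_len (s : List Int) (c : List Int) :
    (s.foldl (fun (c : List Int) (x : Int) =>
      PySem.List.pySetD c (x >>> (16 : Nat)) (PySem.List.pyGetD c (x >>> (16 : Nat)) 0 + 1)) c).length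
    = c.length := by
  induction s generalizing c with
  | nil => rfl
  | cons x t ih => simp only [List.foldl_cons]; rw [ih, PySem.List.length_pySetD]

-- one bump never decreases any entry …
theorem bump_getD_mono (c : List Int) (i : Int) (j : Nat) :
    c.getD j 0 ≤ (PySem.List.pySetD c i (PySem.List.pyGetD c i 0 + 1)).getD j 0 := by
  simp only [PySem.List.pySetD, PySem.List.pySet?, PySem.List.pyIdx?, PySem.List.pyGetD,
    PySem.List.pyGet?]
  split_ifs with h1 h2 h3 <;>
    simp only [Option.map_some, Option.map_none, Option.getD_some, Option.getD_none, le_refl]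
  · rw [getD_set_eq c i.toNat j _ (by omega)]
    split_ifs with h0
    · subst h0
      simp [List.getD, List.getElem?_eq_getElem (show i.toNat < c.length by omega)]
    · exact le_refl _
  · rw [getD_set_eq c (c.length - (-i).toNat) j _ (by omega)]
    split_ifs with h0
    · subst h0
      simp [List.getD, List.getElem?_eq_getElem (show c.length - (-i).toNat < c.length by omega)]
    · exact le_refl _

-- … and adds exactly one at its own index
theorem bump_getD_self (c : List Int) (j : Nat) (hj : j < c.length) :
    (PySem.List.pySetD c ((j : Nat) : Int) (PySem.List.pyGetD c ((j : Nat) : Int) 0 + 1)).getD j 0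
      = c.getD j 0 + 1 := by
  rw [PySem.List.pySetD_of_nonneg c _ (by omega : (0:Int) ≤ ((j : Nat) : Int)), Int.toNat_natCast,
    getD_set_eq c j j _ hj, if_pos rfl,
    PySem.List.pyGetD_natCast]

-- A's/B's counter at slot k dominates the number of stream elements with upper part k
theorem ctr_ge_countP (s : List Int) (c : List Int) (k : Nat)
    (hc : c.length = 65536) (hk : k < 65536) :
    c.getD k 0 + (s.countP (fun (x : Int) => x >>> (16 : Nat) == ((k : Nat) : Int)) : Int)
      ≤ (s.foldl (fun (c : List Int) (x : Int) =>
          PySem.List.pySetD c (x >>> (16 : Nat)) (PySem.List.pyGetD c (x >>> (16 : Nat)) 0 + 1)) c).getD k 0 := by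
  induction s generalizing c with
  | nil => simp
  | cons x t ih =>
    simp only [List.foldl_cons, List.countP_cons]
    have hlen : (PySem.List.pySetD c (x >>> (16 : Nat)) (PySem.List.pyGetD c (x >>> (16 : Nat)) 0 + 1)).length = 65536 := by
      rw [PySem.List.length_pySetD]; exact hc
    have ih' := ih _ hlen
    by_cases hx : x >>> (16 : Nat) = ((k : Nat) : Int)
    · have hb : (PySem.List.pySetD c (x >>> (16 : Nat)) (PySem.List.pyGetD c (x >>> (16 : Nat)) 0 + 1)).getD k 0 = c.getD k 0 + 1 := by
        rw [hx]; exact bump_getD_self c k (by omega)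
      have hxe : (x >>> (16 : Nat) == ((k : Nat) : Int)) = true := by simp [hx]
      rw [hxe]
      simp only [if_pos]
      push_cast
      omega
    · have hb := bump_getD_mono c (x >>> (16 : Nat)) k
      have hxe : (x >>> (16 : Nat) == ((k : Nat) : Int)) = false := by
        simp [hx]
      rw [hxe]
      simp only [Bool.false_eq_true, if_false, add_zero]
      omega

-- A's second loop: pointwise characterisation of the candidates array
theorem candA_getD (s : List Int) (c : List Int) (k : Int) (j : Nat)
    (hc : c.length = 65536) :
    (s.foldl (fun (c : List Int) (x : Int) =>
        if k == x >>> (16 : Nat) then PySem.List.pySetD c (PySem.Int.band 65535 x) 1 else c) c).getD j 0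
      = (if ∃ x ∈ s, x >>> (16 : Nat) = k ∧ PySem.Int.band 65535 x = ((j : Nat) : Int) then 1 else c.getD j 0) ∧
    (s.foldl (fun (c : List Int) (x : Int) =>
        if k == x >>> (16 : Nat) then PySem.List.pySetD c (PySem.Int.band 65535 x) 1 else c) c).length = 65536 := by
  induction s generalizing c with
  | nil => simp [hc]
  | cons x t ih =>
    simp only [List.foldl_cons]
    by_cases hfire : x >>> (16 : Nat) = k
    · have hbb := band_mask_bounds x
      have hset : PySem.List.pySetD c (PySem.Int.band 65535 x) 1 = c.set (PySem.Int.band 65535 x).toNat 1 :=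
        PySem.List.pySetD_of_nonneg c 1 hbb.1
      have hlen : (PySem.List.pySetD c (PySem.Int.band 65535 x) 1).length = 65536 := by
        rw [PySem.List.length_pySetD]; exact hc
      rw [if_pos (by simp [hfire])]
      have ih' := ih _ hlen
      refine ⟨?_, ih'.2⟩
      rw [ih'.1]
      by_cases hmem : ∃ y ∈ t, y >>> (16 : Nat) = k ∧ PySem.Int.band 65535 y = ((j : Nat) : Int)
      · rw [if_pos hmem, if_pos (by obtain ⟨y, hy, h⟩ := hmem; exact ⟨y, List.mem_cons_of_mem _ hy, h⟩)]
      · rw [if_neg hmem, hset, getD_set_eq c (PySem.Int.band 65535 x).toNat j 1 (by omega)]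
        by_cases hxj : PySem.Int.band 65535 x = ((j : Nat) : Int)
        · rw [if_pos (by omega), if_pos ⟨x, List.mem_cons_self, hfire, hxj⟩]
        · rw [if_neg (by omega), if_neg (by
            rintro ⟨y, hy, h1, h2⟩
            rcases List.mem_cons.1 hy with rfl | hy'
            · exact hxj h2
            · exact hmem ⟨y, hy', h1, h2⟩)]
    · rw [if_neg (by simpa using (fun h => hfire h.symm))]
      have ih' := ih c hc
      refine ⟨?_, ih'.2⟩
      rw [ih'.1]
      by_cases hmem : ∃ y ∈ t, y >>> (16 : Nat) = k ∧ PySem.Int.band 65535 y = ((j : Nat) : Int)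
      · rw [if_pos hmem, if_pos (by obtain ⟨y, hy, h⟩ := hmem; exact ⟨y, List.mem_cons_of_mem _ hy, h⟩)]
      · rw [if_neg hmem, if_neg (by
          rintro ⟨y, hy, h1, h2⟩
          rcases List.mem_cons.1 hy with rfl | hy'
          · exact hfire h1
          · exact hmem ⟨y, hy', h1, h2⟩)]

-- B's lows fold: membership in the bucket-k set
theorem lowsB_mem (s : List Int) (d : PySem.Dict Int (PySem.Set Int)) (k m : Int) :
    m ∈ (s.foldl (fun (d : PySem.Dict Int (PySem.Set Int)) (x : Int) =>
          d.insert (x >>> (16 : Nat))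
            (PySem.Set.add (d.getD (x >>> (16 : Nat)) PySem.Set.empty) (PySem.Int.band x 65535))) d).getD k PySem.Set.empty
      ↔ m ∈ d.getD k PySem.Set.empty ∨ ∃ x ∈ s, x >>> (16 : Nat) = k ∧ PySem.Int.band x 65535 = m := by
  induction s generalizing d with
  | nil => simp
  | cons x t ih =>
    simp only [List.foldl_cons, ih, PySem.Dict.getD_insert]
    by_cases hx : x >>> (16 : Nat) = k
    · rw [if_pos hx.symm, hx]
      simp only [PySem.Set.mem_add, List.mem_cons]
      constructor
      · rintro ((h | h) | ⟨y, hy, h1, h2⟩)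
        · exact Or.inl h
        · exact Or.inr ⟨x, Or.inl rfl, hx, h.symm⟩
        · exact Or.inr ⟨y, Or.inr hy, h1, h2⟩
      · rintro (h | ⟨y, hy, hb, hm⟩)
        · exact Or.inl (Or.inl h)
        · rcases hy with rfl | hy'
          · exact Or.inl (Or.inr hm.symm)
          · exact Or.inr ⟨y, hy', hb, hm⟩
    · rw [if_neg (fun h => hx h.symm)]
      constructor
      · rintro (h | ⟨y, hy, hb, hm⟩)
        · exact Or.inl h
        · exact Or.inr ⟨y, List.mem_cons_of_mem _ hy, hb, hm⟩
      · rintro (h | ⟨y, hy, hb, hm⟩)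
        · exact Or.inl h
        · rcases List.mem_cons.1 hy with rfl | hy'
          · exact absurd hb hx
          · exact Or.inr ⟨y, hy', hb, hm⟩

-- pyFirstInRange finds the first admissible index
theorem pyFirstInRange_eq (n : Nat) (a r : Int) (pred : Int → Bool)
    (h1 : a ≤ r) (h2 : r < a + n) (h3 : pred r = true)
    (h4 : ∀ j, a ≤ j → j < r → pred j = false) :
    pyFirstInRange n a pred = some r := by
  induction n generalizing a with
  | zero => omega
  | succ m ih =>
    by_cases ha : a = r
    · subst ha; simp [pyFirstInRange, h3]
    · have hfa : pred a = false := h4 a le_rfl (by omega)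
      simp only [pyFirstInRange, hfa, Bool.false_eq_true, if_false]
      exact ih (a + 1) (by omega) (by push_cast at h2 ⊢; omega) (fun j hj1 hj2 => h4 j (by omega) hj2)

-- fewer than 2^16 elements in bucket k ⇒ some low-16 value of bucket k is absent
theorem exists_missing (s : List Int) (k : Int)
    (h : s.countP (fun (x : Int) => x >>> (16 : Nat) == k) < 65536) :
    ∃ j : Nat, j < 65536 ∧ ¬ ∃ x ∈ s, x >>> (16 : Nat) = k ∧ PySem.Int.band 65535 x = ((j : Nat) : Int) := by
  by_contra hcon
  push_neg at hcon
  have hsub : (Finset.range 65536).image (fun j : Nat => (j : Int)) ⊆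
      ((s.filter (fun (x : Int) => x >>> (16 : Nat) == k)).map (fun x => PySem.Int.band 65535 x)).toFinset := by
    intro y hy
    simp only [Finset.mem_image, Finset.mem_range] at hy
    obtain ⟨j, hj, rfl⟩ := hy
    obtain ⟨x, hx, h1, h2⟩ := hcon j hj
    rw [List.mem_toFinset, List.mem_map]
    exact ⟨x, List.mem_filter.2 ⟨hx, by simp [h1]⟩, h2⟩
  have hcard := Finset.card_le_card hsub
  rw [Finset.card_image_of_injective _ (fun a b h => by exact_mod_cast h), Finset.card_range] at hcard
  have h1 := List.toFinset_card_le ((s.filter (fun (x : Int) => x >>> (16 : Nat) == k)).map (fun x => PySem.Int.band 65535 x))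
  rw [List.length_map, ← List.countP_eq_length_filter] at h1
  omega

-- the first zero of a 0/1 presence array is the least index outside the predicate
theorem findIdx_eq_least (l : List Int) (P : Nat → Prop) [DecidablePred P] (k : Nat) (hl : l.length = 65536) (hk : k < 65536)
    (hval : ∀ j : Nat, j < 65536 → l.getD j 0 = if P j then 1 else 0)
    (hknot : ¬ P k) (hmin : ∀ j : Nat, j < k → P j) :
    l.findIdx (fun v => v == 0) = k := by
  rw [List.findIdx_eq (show k < l.length by omega)]
  refine ⟨?_, ?_⟩
  · have h := hval k hk
    rw [List.getD, List.getElem?_eq_getElem (show k < l.length by omega), Option.getD_some,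
      if_neg hknot] at h
    simp [h]
  · intro j hj
    have h := hval j (by omega)
    rw [List.getD, List.getElem?_eq_getElem (show j < l.length by omega), Option.getD_some,
      if_pos (hmin j hj)] at h
    simp [h]

-- ===== VERDICT (by name: the statement is the Claim_ definition above) =====
theorem find_missing_element_spec : Claim_equal_find_missing_element := by
  intro stream hdom
  have hdom' : ∀ x ∈ stream, pvDomInt x = true := by
    unfold Dom_find_missing_element at hdom
    simpa [List.all_eq_true] using hdom
  unfold Spec_find_missing_element find_missing_element find_missing_element_alt
  dsimp only
  have hnb : (1 <<< 16 : Nat) = 65536 := by decide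
  rw [hnb]
  rw [PySem.List.foldl_prod_mk
    (f := fun (c : List Int) (x : Int) =>
      PySem.List.pySetD c (x >>> (16 : Nat)) (PySem.List.pyGetD c (x >>> (16 : Nat)) 0 + 1))
    (g := fun (d : PySem.Dict Int (PySem.Set Int)) (x : Int) =>
      PySem.Dict.insert d (x >>> (16 : Nat))
        (PySem.Set.add (PySem.Dict.getD d (x >>> (16 : Nat)) PySem.Set.empty) (PySem.Int.band x 65535)))]
  dsimp only
  set ctr : List Int := stream.foldl
    (fun (c : List Int) (x : Int) =>
      PySem.List.pySetD c (x >>> (16 : Nat)) (PySem.List.pyGetD c (x >>> (16 : Nat)) 0 + 1))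
    (List.replicate 65536 0) with hctr
  have hlen : ctr.length = 65536 := by
    rw [hctr, ctr_len, List.length_replicate]
  set cand : Nat := ctr.findIdx (fun c => decide (c < 65536)) with hcand
  -- bucket `cand` is not saturated
  have hcount : stream.countP (fun (x : Int) => x >>> (16 : Nat) == ((cand : Nat) : Int)) < 65536 := by
    by_cases hlt : cand < 65536
    · have hfi := (List.findIdx_eq (p := fun c => decide (c < 65536)) (show cand < ctr.length by omega)).mp rfl
      have hval : ctr[cand]'(by omega) < 65536 := by simpa using hfi.1
      have hge := ctr_ge_countP stream (List.replicate 65536 0) cand (by rw [List.length_replicate]) hlt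
      rw [← hctr, getD_repl, zero_add] at hge
      have hgd : ctr.getD cand 0 = ctr[cand]'(by omega) := by
        rw [List.getD, List.getElem?_eq_getElem (show cand < ctr.length by omega), Option.getD_some]
      rw [hgd] at hge
      omega
    · have hc65536 : cand = 65536 := by
        have := List.findIdx_le_length (p := fun c => decide (c < 65536)) (xs := ctr)
        omega
      have hz : stream.countP (fun (x : Int) => x >>> (16 : Nat) == ((cand : Nat) : Int)) = 0 := by
        rw [List.countP_eq_zero]
        intro x hx
        have hb := shift16_bound x (hdom' x hx)
        simp only [beq_iff_eq, hc65536]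
        intro he
        rw [he] at hb
        norm_num at hb
      omega
  -- the least absent low-16 value of bucket `cand`
  have hex := exists_missing stream ((cand : Nat) : Int) hcount
  set jm : Nat := Nat.find hex with hjm
  have hjlt : jm < 65536 := (Nat.find_spec hex).1
  have hjnot : ¬ ∃ x ∈ stream, x >>> (16 : Nat) = ((cand : Nat) : Int) ∧
      PySem.Int.band 65535 x = ((jm : Nat) : Int) := (Nat.find_spec hex).2
  have hjmin : ∀ j : Nat, j < jm → ∃ x ∈ stream, x >>> (16 : Nat) = ((cand : Nat) : Int) ∧
      PySem.Int.band 65535 x = ((j : Nat) : Int) := by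
    intro j hj
    have hne := Nat.find_min hex hj
    push_neg at hne
    by_contra hcon
    exact hcon (hne (by omega))
  -- A's final index is jm
  have hA : (stream.foldl (fun (c : List Int) (x : Int) =>
      if ((cand : Nat) : Int) == x >>> (16 : Nat) then PySem.List.pySetD c (PySem.Int.band 65535 x) 1 else c)
      (List.replicate 65536 0)).findIdx (fun v => v == 0) = jm := by
    apply findIdx_eq_least _
      (fun j : Nat => ∃ x ∈ stream, x >>> (16 : Nat) = ((cand : Nat) : Int) ∧
        PySem.Int.band 65535 x = ((j : Nat) : Int)) jm
      ((candA_getD stream (List.replicate 65536 0) ((cand : Nat) : Int) 0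
        (by rw [List.length_replicate])).2) hjlt ?_ hjnot hjmin
    intro j hj
    rw [(candA_getD stream (List.replicate 65536 0) ((cand : Nat) : Int) j
      (by rw [List.length_replicate])).1]
    split_ifs with h
    · rfl
    · exact getD_repl j
  -- B's final index is jm
  have hB : pyFirstInRange 65536 0 (fun i => !(PySem.Set.contains
      ((stream.foldl (fun (d : PySem.Dict Int (PySem.Set Int)) (x : Int) =>
          PySem.Dict.insert d (x >>> (16 : Nat))
            (PySem.Set.add (PySem.Dict.getD d (x >>> (16 : Nat)) PySem.Set.empty) (PySem.Int.band x 65535)))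
        PySem.Dict.empty).getD ((cand : Nat) : Int) PySem.Set.empty) i)) = some ((jm : Nat) : Int) := by
    apply pyFirstInRange_eq _ _ _ _ (by omega) (by push_cast; omega)
    · rw [Bool.not_eq_true', ← Bool.not_eq_true, PySem.Set.contains_iff, lowsB_mem,
        PySem.Dict.getD_empty]
      rintro (h | ⟨x, hx, h1, h2⟩)
      · simp [PySem.Set.empty] at h
      · exact hjnot ⟨x, hx, h1, by rw [← h2, PySem.Int.band_comm]⟩
    · intro j hj0 hjr
      rw [Bool.not_eq_false', PySem.Set.contains_iff, lowsB_mem, PySem.Dict.getD_empty]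
      obtain ⟨x, hx, h1, h2⟩ := hjmin j.toNat (by omega)
      refine Or.inr ⟨x, hx, h1, ?_⟩
      rw [PySem.Int.band_comm, h2]
      omega
  rw [hA, hB]
  rfl
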